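-- pv_equiv track=rewrite | github.com/mattarm555/discordBotGoogle2 | cogs/slots.py | render_window_highlight
-- ===== SOURCE A (Python) =====
-- def render_window_highlight(window_rows: list[list[str]], active_patterns: list[list[int]]) -> str:
--     """Render the 3x3 window, bolding symbols that belong to any active payline.
--
--     active_patterns: list of row-index patterns (one per column) for purchased lines.
--     """
--     active_positions = set()
--     for pattern in active_patterns:
--         for col, row in enumerate(pattern):
--             active_positions.add((row, col))
--     out_lines = []
--     for r, row_syms in enumerate(window_rows):
--         rendered = []
--         for c, sym in enumerate(row_syms):
--             if (r, c) in active_positions: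
--                 rendered.append(f"**{sym}**")
--             else:
--                 rendered.append(sym)
--         out_lines.append("  ".join(rendered))
--     return "\n".join(out_lines)
-- ===== SOURCE B (Python) =====
-- def render_window_highlight(window_rows: list[list[str]], active_patterns: list[list[int]]) -> str:
--     """Render the window, bolding symbols on any active payline.
--
--     No auxiliary position set: each cell's activation is decided on the fly
--     by scanning the patterns directly.
--     """
--     lines = []
--     for r, row_syms in enumerate(window_rows):
--         cells = []
--         for c, sym in enumerate(row_syms):
--             active = any(c < len(pat) and pat[c] == r for pat in active_patterns)
--             cells.append(f"**{sym}**" if active else sym)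
--         lines.append("  ".join(cells))
--     return "\n".join(lines)
-- ===== Notes on version B (the rewrite author's own statement) =====
-- stated objective: simpler
-- what changed: Drops the precomputed active-position set; each cell's bolding is decided on the fly by scanning active_patterns with any(), using a c < len(pat) guard so ragged patterns behave identically.
import Mathlib
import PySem

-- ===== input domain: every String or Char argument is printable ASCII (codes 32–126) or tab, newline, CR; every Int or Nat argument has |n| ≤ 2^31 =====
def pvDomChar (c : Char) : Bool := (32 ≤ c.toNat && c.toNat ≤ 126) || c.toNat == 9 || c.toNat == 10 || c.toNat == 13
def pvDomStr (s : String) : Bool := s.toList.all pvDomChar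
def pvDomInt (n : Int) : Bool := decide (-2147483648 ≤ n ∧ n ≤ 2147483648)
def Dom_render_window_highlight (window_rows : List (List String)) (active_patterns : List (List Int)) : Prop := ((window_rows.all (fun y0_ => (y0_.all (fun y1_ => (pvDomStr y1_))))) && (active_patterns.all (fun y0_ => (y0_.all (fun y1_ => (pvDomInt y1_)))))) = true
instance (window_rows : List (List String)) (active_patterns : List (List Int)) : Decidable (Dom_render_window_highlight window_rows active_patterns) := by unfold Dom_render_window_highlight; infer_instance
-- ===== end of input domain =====

-- B drops A's precomputed active-position set and decides each cell's bolding on the fly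
-- by scanning active_patterns directly (objective: simpler).

-- ===== PORT A =====
def render_window_highlight (window_rows : List (List String)) (active_patterns : List (List Int)) : String :=
  let active_positions : PySem.Set (Int × Int) :=
    active_patterns.foldl (fun s pattern =>
      (PySem.List.enumerate pattern).foldl (fun s cr => PySem.Set.add s (cr.2, cr.1)) s)
      PySem.Set.empty
  let out_lines : List String :=
    (PySem.List.enumerate window_rows).foldl (fun acc rrow =>
      let rendered : List String :=
        (PySem.List.enumerate rrow.2).foldl (fun rd cs =>
          rd ++ [if PySem.Set.contains active_positions (rrow.1, cs.1) then "**" ++ cs.2 ++ "**" else cs.2]) []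
      acc ++ [PySem.Str.join "  " rendered]) []
  PySem.Str.join "\n" out_lines

-- ===== PORT B =====
def render_window_highlight_alt (window_rows : List (List String)) (active_patterns : List (List Int)) : String :=
  PySem.Str.join "\n" ((PySem.List.enumerate window_rows).map (fun rrow =>
    PySem.Str.join "  " ((PySem.List.enumerate rrow.2).map (fun cs =>
      if active_patterns.any (fun pat =>
           decide (cs.1 < (pat.length : Int)) && (PySem.List.pyGet? pat cs.1 == some rrow.1))
      then "**" ++ cs.2 ++ "**" else cs.2))))

-- ===== PRECONDITION & SPEC =====
def Spec_render_window_highlight (window_rows : List (List String)) (active_patterns : List (List Int)) (out : String) : Prop := out = render_window_highlight_alt window_rows active_patterns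
instance (window_rows : List (List String)) (active_patterns : List (List Int)) (out : String) : Decidable (Spec_render_window_highlight window_rows active_patterns out) := by unfold Spec_render_window_highlight; infer_instance

-- ===== CLAIM (what is proved, stated in full; the proofs are below) =====
def Claim_equal_render_window_highlight : Prop := ∀ (window_rows : List (List String)) (active_patterns : List (List Int)), Dom_render_window_highlight window_rows active_patterns → Spec_render_window_highlight window_rows active_patterns (render_window_highlight window_rows active_patterns)

-- ===== LEMMAS AND PROOFS =====

-- Membership in A's accumulated position set.
theorem mem_build (ap : List (List Int)) (s0 : PySem.Set (Int × Int)) (y : Int × Int) :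
    y ∈ ap.foldl (fun s pattern =>
        (PySem.List.enumerate pattern).foldl (fun s cr => PySem.Set.add s (cr.2, cr.1)) s) s0
    ↔ y ∈ s0 ∨ ∃ p ∈ ap, ∃ (k : Nat) (_ : k < p.length), y = (p[k], (k : Int)) := by
  induction ap generalizing s0 with
  | nil => simp
  | cons p t ih =>
    simp only [List.foldl_cons, ih, PySem.Set.mem_foldl_add, PySem.List.mem_enumerate_iff,
      List.mem_cons]
    constructor
    · rintro (⟨h | ⟨cr, ⟨k, hk, rfl⟩, rfl⟩⟩ | ⟨q, hq, k, hk, rfl⟩)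
      · exact Or.inl h
      · exact Or.inr ⟨p, Or.inl rfl, k, hk, by simp⟩
      · exact Or.inr ⟨q, Or.inr hq, k, hk, rfl⟩
    · rintro (h | ⟨q, hq | hq, k, hk, rfl⟩)
      · exact Or.inl (Or.inl h)
      · subst hq; exact Or.inl (Or.inr ⟨(((0:Int) + k), q[k]), ⟨k, hk, rfl⟩, by simp⟩)
      · exact Or.inr ⟨q, hq, k, hk, rfl⟩

-- One cell: A's set lookup equals B's direct scan, at a nonnegative column index.
theorem cell_eq (ap : List (List Int)) (r : Int) (k : Nat) :
    PySem.Set.contains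
      (ap.foldl (fun s pattern =>
        (PySem.List.enumerate pattern).foldl (fun s cr => PySem.Set.add s (cr.2, cr.1)) s)
        PySem.Set.empty) (r, (k : Int))
    = ap.any (fun pat =>
        decide ((k : Int) < (pat.length : Int)) && (PySem.List.pyGet? pat (k : Int) == some r)) := by
  rw [Bool.eq_iff_iff, PySem.Set.contains_iff, mem_build, List.any_eq_true]
  simp only [PySem.Set.empty, List.not_mem_nil, false_or, Bool.and_eq_true, decide_eq_true_eq,
    beq_iff_eq]
  constructor
  · rintro ⟨p, hp, j, hj, h⟩
    obtain ⟨h1, h2⟩ := Prod.mk.injEq .. ▸ h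
    have : j = k := by exact_mod_cast h2.symm
    subst this
    refine ⟨p, hp, by exact_mod_cast hj, ?_⟩
    rw [show ((j : Int)) = ((j : Nat) : Int) from rfl, PySem.List.pyGet?_natCast]
    simp [hj, h1]
  · rintro ⟨p, hp, hlt, hget⟩
    have hk : k < p.length := by exact_mod_cast hlt
    rw [PySem.List.pyGet?_natCast] at hget
    refine ⟨p, hp, k, hk, ?_⟩
    have : p[k]? = some r := by simpa using hget
    simp_all

-- ===== VERDICT (by name: the statement is the Claim_ definition above) =====
theorem render_window_highlight_spec : Claim_equal_render_window_highlight := by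
  intro wr ap _
  unfold Spec_render_window_highlight render_window_highlight render_window_highlight_alt
  simp only [PySem.List.foldl_append_singleton_eq_map]
  congr 1
  apply List.map_congr_left
  intro rrow _
  congr 1
  apply List.map_congr_left
  intro cs hcs
  obtain ⟨k, hk, rfl⟩ := (PySem.List.mem_enumerate_iff _ _ _).mp hcs
  simp only [zero_add]
  rw [cell_eq]
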